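-- pv_equiv track=rewrite | github.com/Inteegrus-Research/watchdog | agents/trust_analyst.py | _resolve_package
-- ===== SOURCE A (Python) =====
-- from typing import Any
--
-- def _resolve_package(package_name: str, metadata: dict[str, Any]) -> str:
--     """
--     Map a raw package_name (from the file path) to a key in the metadata dict.
--
--     Strategy:
--       1. Direct match (e.g. 'computil' → 'computil').
--       2. Case-insensitive match.
--       3. Partial match (metadata key is substring of package_name or vice versa).
--       4. Fallback to a generic 'unknown' sentinel.
--     """
--     if package_name in metadata:
--         return package_name
--     lower = package_name.lower()
--     for key in metadata:
--         if key.lower() == lower: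
--             return key
--     for key in metadata:
--         k = key.lower()
--         if k in lower or lower in k:
--             return key
--     return "__unknown__"
-- ===== SOURCE B (Python) =====
-- def _resolve_package(package_name: str, metadata) -> str:
--     """Single pass over the keys, keeping the first case-insensitive and the
--     first partial candidate; exact match returns immediately."""
--     lower = package_name.lower()
--     ci = partial = None
--     for key in metadata:
--         if key == package_name:
--             return key
--         k = key.lower()
--         if k == lower:
--             if ci is None:
--                 ci = key
--         elif ci is None and partial is None and (k in lower or lower in k):
--             partial = key
--     if ci is not None:
--         return ci
--     if partial is not None:
--         return partial
--     return "__unknown__"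
-- ===== Notes on version B (the rewrite author's own statement) =====
-- stated objective: simpler
-- what changed: Replaces A's three sequential scans (membership test, case-insensitive scan, substring scan) with one pass that returns on an exact key and otherwise records the first case-insensitive and first partial candidates, choosing by priority after the loop.
import Mathlib
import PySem

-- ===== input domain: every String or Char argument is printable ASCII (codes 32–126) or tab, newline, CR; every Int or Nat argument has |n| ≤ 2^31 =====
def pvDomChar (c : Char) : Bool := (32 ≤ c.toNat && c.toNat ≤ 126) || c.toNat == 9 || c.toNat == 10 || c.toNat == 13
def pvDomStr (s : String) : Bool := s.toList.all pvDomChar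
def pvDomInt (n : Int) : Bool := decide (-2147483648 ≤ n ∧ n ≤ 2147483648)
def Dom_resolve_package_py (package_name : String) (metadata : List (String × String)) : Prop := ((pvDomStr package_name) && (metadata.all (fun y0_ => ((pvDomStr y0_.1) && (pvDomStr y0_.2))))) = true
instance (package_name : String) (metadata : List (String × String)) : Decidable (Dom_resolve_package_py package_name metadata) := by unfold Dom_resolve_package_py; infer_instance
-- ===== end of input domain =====

-- B replaces A's three sequential scans with one pass keeping first CI/partial candidates (simpler decomposition).


-- ===== PORT A =====
-- A: membership test, then a case-insensitive scan, then a substring scan, else "__unknown__".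
def resolve_package_py (package_name : String) (metadata : List (String × String)) : String :=
  if metadata.any (fun kv => kv.1 == package_name) then package_name
  else
    let lower := PySem.Str.lower package_name
    match metadata.find? (fun kv => PySem.Str.lower kv.1 == lower) with
    | some kv => kv.1
    | none =>
      match metadata.find? (fun kv =>
          PySem.Str.isIn (PySem.Str.lower kv.1) lower || PySem.Str.isIn lower (PySem.Str.lower kv.1)) with
      | some kv => kv.1
      | none => "__unknown__"

-- ===== PORT B =====
-- B's single loop: return on exact match, else record first CI / first partial candidate.
def resolvePkgLoop (package_name lower : String) :
    List (String × String) → Option String → Option String → String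
  | [], ci, partial_ =>
    match ci with
    | some k => k
    | none =>
      match partial_ with
      | some k => k
      | none => "__unknown__"
  | kv :: rest, ci, partial_ =>
    if kv.1 == package_name then kv.1
    else
      let k := PySem.Str.lower kv.1
      if k == lower then
        resolvePkgLoop package_name lower rest (if ci.isNone then some kv.1 else ci) partial_
      else if ci.isNone && partial_.isNone && (PySem.Str.isIn k lower || PySem.Str.isIn lower k) then
        resolvePkgLoop package_name lower rest ci (some kv.1)
      else
        resolvePkgLoop package_name lower rest ci partial_

def resolve_package_py_alt (package_name : String) (metadata : List (String × String)) : String :=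
  resolvePkgLoop package_name (PySem.Str.lower package_name) metadata none none

-- ===== PRECONDITION & SPEC =====
def Spec_resolve_package_py (package_name : String) (metadata : List (String × String)) (out : String) : Prop := out = resolve_package_py_alt package_name metadata
instance (package_name : String) (metadata : List (String × String)) (out : String) : Decidable (Spec_resolve_package_py package_name metadata out) := by unfold Spec_resolve_package_py; infer_instance

-- ===== CLAIM (what is proved, stated in full; the proofs are below) =====
def Claim_equal_resolve_package_py : Prop := ∀ (package_name : String) (metadata : List (String × String)), Dom_resolve_package_py package_name metadata → Spec_resolve_package_py package_name metadata (resolve_package_py package_name metadata)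

-- ===== LEMMAS AND PROOFS =====

-- What the loop computes, as a function of the remaining list and the accumulators.
def resolvePkgFinish (package_name lower : String) (md : List (String × String))
    (ci partial_ : Option String) : String :=
  match md.find? (fun kv => kv.1 == package_name) with
  | some _ => package_name
  | none =>
    match ci with
    | some k => k
    | none =>
      match md.find? (fun kv => PySem.Str.lower kv.1 == lower) with
      | some kv => kv.1
      | none =>
        match partial_ with
        | some k => k
        | none =>
          match md.find? (fun kv =>
              (PySem.Str.isIn (PySem.Str.lower kv.1) lower || PySem.Str.isIn lower (PySem.Str.lower kv.1))
                && !(PySem.Str.lower kv.1 == lower)) with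
          | some kv => kv.1
          | none => "__unknown__"

-- find? ignores the predicate's value outside the list (no such lemma found in Mathlib/PySem).
theorem find?_congr_mem {α : Type} (p q : α → Bool) :
    ∀ (l : List α), (∀ a ∈ l, p a = q a) → l.find? p = l.find? q := by
  intro l
  induction l with
  | nil => intro _; rfl
  | cons x xs ih =>
    intro h
    simp only [List.find?_cons, h x (List.mem_cons_self)]
    cases hq : q x
    · exact ih (fun a ha => h a (List.mem_cons_of_mem x ha))
    · rfl

theorem resolvePkgLoop_eq_finish (package_name lower : String) :
    ∀ (md : List (String × String)) (ci partial_ : Option String),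
      resolvePkgLoop package_name lower md ci partial_ =
        resolvePkgFinish package_name lower md ci partial_ := by
  intro md
  induction md with
  | nil =>
    intro ci partial_
    cases ci <;> cases partial_ <;> rfl
  | cons kv rest ih =>
    intro ci partial_
    by_cases hex : (kv.1 == package_name) = true
    · have h1 : kv.1 = package_name := beq_iff_eq.mp hex
      simp [resolvePkgLoop, resolvePkgFinish, h1]
    · rw [Bool.not_eq_true] at hex
      by_cases hci : (PySem.Str.lower kv.1 == lower) = true
      · rw [resolvePkgLoop]
        simp only [hex, Bool.false_eq_true, if_false, hci, if_true]
        rw [ih]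
        cases ci with
        | some c =>
          rw [if_neg (by simp)]
          unfold resolvePkgFinish
          simp only [List.find?_cons, hex]
        | none =>
          have hn : (none : Option String).isNone = true := rfl
          rw [if_pos hn]
          unfold resolvePkgFinish
          simp only [List.find?_cons, hex, hci]
      · rw [Bool.not_eq_true] at hci
        cases ci with
        | some c =>
          rw [resolvePkgLoop]
          simp only [hex, Bool.false_eq_true, if_false, hci, Option.isNone_some,
            Bool.false_and, if_false]
          rw [ih]
          unfold resolvePkgFinish
          simp only [List.find?_cons, hex]
        | none =>
          by_cases hp : (PySem.Str.isIn (PySem.Str.lower kv.1) lower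
              || PySem.Str.isIn lower (PySem.Str.lower kv.1)) = true
          · cases partial_ with
            | none =>
              rw [resolvePkgLoop]
              simp only [hex, Bool.false_eq_true, if_false, hci, hp, Option.isNone_none,
                Bool.true_and, if_true]
              rw [ih]
              unfold resolvePkgFinish
              simp only [List.find?_cons, hex, hci, hp, Bool.not_false, Bool.and_true]
            | some p =>
              rw [resolvePkgLoop]
              simp only [hex, hci, Option.isNone_none, Option.isNone_some, Bool.true_and,
                Bool.false_and, Bool.false_eq_true, if_false]
              rw [ih]
              unfold resolvePkgFinish
              simp only [List.find?_cons, hex, hci]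
          · rw [Bool.not_eq_true] at hp
            rw [resolvePkgLoop]
            simp only [hex, Bool.false_eq_true, if_false, hci, hp, Bool.and_false, if_false]
            rw [ih]
            unfold resolvePkgFinish
            simp only [List.find?_cons, hex, hci, hp, Bool.false_and]

-- ===== VERDICT (by name: the statement is the Claim_ definition above) =====
theorem resolve_package_py_spec : Claim_equal_resolve_package_py := by
  intro package_name metadata _
  unfold Spec_resolve_package_py resolve_package_py_alt
  rw [resolvePkgLoop_eq_finish]
  unfold resolve_package_py resolvePkgFinish
  by_cases hex : metadata.any (fun kv => kv.1 == package_name)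
  · rw [if_pos hex]
    rw [List.any_eq_true] at hex
    obtain ⟨kv, hmem, hkv⟩ := hex
    cases h : metadata.find? (fun kv => kv.1 == package_name) with
    | none =>
      rw [List.find?_eq_none] at h
      exact absurd hkv (h kv hmem)
    | some _ => rfl
  · have hfind : metadata.find? (fun kv => kv.1 == package_name) = none := by
      rw [List.find?_eq_none]
      intro kv hmem hkv
      exact hex (List.any_eq_true.mpr ⟨kv, hmem, hkv⟩)
    rw [if_neg hex, hfind]
    dsimp only
    cases hci : metadata.find? (fun kv => PySem.Str.lower kv.1 == PySem.Str.lower package_name) with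
    | some kv => rfl
    | none =>
      rw [List.find?_eq_none] at hci
      have hcongr : metadata.find? (fun kv =>
          (PySem.Str.isIn (PySem.Str.lower kv.1) (PySem.Str.lower package_name)
            || PySem.Str.isIn (PySem.Str.lower package_name) (PySem.Str.lower kv.1))
            && !(PySem.Str.lower kv.1 == PySem.Str.lower package_name)) =
          metadata.find? (fun kv =>
            PySem.Str.isIn (PySem.Str.lower kv.1) (PySem.Str.lower package_name)
            || PySem.Str.isIn (PySem.Str.lower package_name) (PySem.Str.lower kv.1)) := by
        apply find?_congr_mem
        intro kv hmem
        have h := hci kv hmem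
        rw [Bool.not_eq_true] at h
        simp [h]
      rw [hcongr]
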